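-- pv_equiv track=rewrite | github.com/Agozik123/- | labwork115.py | f
-- ===== SOURCE A (Python) =====
-- def f(s):
--   a = ""
--   b = ""
--   for i in range(len(s)):
--     if i > 0 and ord(s[i]) == ord(s[i-1]) + 1:
--       b += s[i]
--     else:
--       b = s[i]
--     if len(b) > len(a):
--       a = b
--   return a
-- ===== SOURCE B (Python) =====
-- def f(s):
--     # Run-length DP: lens[i] = length of the ascending-codepoint run ending at i.
--     # The answer is the single slice of length m = max(lens) ending at its first argmax.
--     if not s:
--         return ""
--     lens = []
--     k = 0
--     prev = None
--     for c in s: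
--         k = k + 1 if prev is not None and ord(c) == ord(prev) + 1 else 1
--         lens.append(k)
--         prev = c
--     m = max(lens)
--     j = lens.index(m)
--     return s[j - m + 1 : j + 1]
-- ===== Notes on version B (the rewrite author's own statement) =====
-- stated objective: faster
-- what changed: A grows candidate substrings character by character and keeps the best string seen so far; B instead computes a numeric run-length DP table (lens[i] = length of the ascending run ending at i), takes the first argmax of the table, and produces the answer with a single slice.
import Mathlib
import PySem

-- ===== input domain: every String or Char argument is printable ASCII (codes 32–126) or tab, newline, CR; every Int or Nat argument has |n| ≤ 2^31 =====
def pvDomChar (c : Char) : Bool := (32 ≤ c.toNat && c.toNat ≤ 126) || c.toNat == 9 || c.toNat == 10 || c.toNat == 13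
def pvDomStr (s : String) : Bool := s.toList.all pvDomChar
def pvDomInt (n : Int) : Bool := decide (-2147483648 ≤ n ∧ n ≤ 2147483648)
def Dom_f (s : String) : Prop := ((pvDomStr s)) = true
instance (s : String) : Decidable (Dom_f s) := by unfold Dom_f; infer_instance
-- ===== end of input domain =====

-- B replaces A's interleaved best-substring bookkeeping by a run-length DP (lens[i] =
-- length of the ascending run ending at i), an argmax over the numeric table and a single
-- slice, avoiding per-step string concatenation (objective: faster, measured constant-factor).

-- ===== PORT A =====
-- loop body of A, state (a, b); both s[i] and s[i-1] are accessed only inside range(len(s)),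
-- so pyGetD's default is never used
def fStep (cs : List Char) (st : List Char × List Char) (i : Int) : List Char × List Char :=
  let b' := if i > 0 ∧ (PySem.List.pyGetD cs i ' ').toNat = (PySem.List.pyGetD cs (i - 1) ' ').toNat + 1
            then st.2 ++ [PySem.List.pyGetD cs i ' ']
            else [PySem.List.pyGetD cs i ' ']
  (if b'.length > st.1.length then b' else st.1, b')

def f (s : String) : String :=
  let cs := s.toList
  let st := (PySem.List.pyRange 0 (cs.length : Int)).foldl (fStep cs) ([], [])
  String.ofList st.1

-- ===== PORT B =====
-- loop body of B, state (lens, k, prev)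
def fAltStep (st : List Int × Int × Option Char) (c : Char) : List Int × Int × Option Char :=
  let k : Int := match st.2.2 with
    | some p => if c.toNat = p.toNat + 1 then st.2.1 + 1 else 1
    | none => 1
  (st.1 ++ [k], k, some c)

def f_alt (s : String) : String :=
  if s.toList = [] then "" else
    let st := s.toList.foldl fAltStep ([], 0, none)
    match PySem.List.max? st.1 (fun x => x) with
    | some m =>
      match PySem.List.index? st.1 m with
      | some j => String.ofList (PySem.List.slice s.toList (some ((j : Int) - m + 1)) (some ((j : Int) + 1)))
      | none => ""   -- unreachable: max? returns an element of the list
    | none => ""     -- unreachable: the guard makes the list nonempty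

-- ===== PRECONDITION & SPEC =====
def Spec_f (s : String) (out : String) : Prop := out = f_alt s
instance (s : String) (out : String) : Decidable (Spec_f s out) := by unfold Spec_f; infer_instance

-- ===== CLAIM (what is proved, stated in full; the proofs are below) =====
def Claim_equal_f : Prop := ∀ (s : String), Dom_f s → Spec_f s (f s)

-- ===== LEMMAS AND PROOFS =====

theorem max?_append_singleton (xs : List Int) (x m : Int)
    (h : PySem.List.max? xs (fun y => y) = some m) :
    PySem.List.max? (xs ++ [x]) (fun y => y) = some (if m < x then x else m) := by
  simp only [PySem.List.max?, List.foldl_append, List.foldl_cons, List.foldl_nil]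
  simp only [PySem.List.max?] at h
  rw [h]
  by_cases h1 : m < x <;> simp [h1]

theorem fold_congr (ds : List Char) (c : Char) (init : List Char × List Char) :
    (PySem.List.pyRange 0 (ds.length : Int)).foldl (fStep (ds ++ [c])) init
      = (PySem.List.pyRange 0 (ds.length : Int)).foldl (fStep ds) init := by
  apply PySem.List.foldl_congr_mem
  intro acc i hi
  rw [PySem.List.mem_pyRange_one] at hi
  obtain ⟨h0, h1⟩ := hi
  have hg1 : PySem.List.pyGetD (ds ++ [c]) i ' ' = PySem.List.pyGetD ds i ' ' := by
    rw [PySem.List.pyGetD_eq_getElem (ds ++ [c]) ' ' h0 (by simp; omega),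
        PySem.List.pyGetD_eq_getElem ds ' ' h0 h1]
    exact List.getElem_append_left (by omega)
  by_cases hp : 0 < i
  · have hg2 : PySem.List.pyGetD (ds ++ [c]) (i - 1) ' ' = PySem.List.pyGetD ds (i - 1) ' ' := by
      rw [PySem.List.pyGetD_eq_getElem (ds ++ [c]) ' ' (by omega) (by simp; omega),
          PySem.List.pyGetD_eq_getElem ds ' ' (by omega) (by omega)]
      exact List.getElem_append_left (by omega)
    unfold fStep
    rw [hg1, hg2]
  · unfold fStep
    simp [hg1, hp]

-- the invariant tying A's (a, b) state to B's run-length table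
theorem inv (cs : List Char) (h : cs ≠ []) :
    ∃ (m : Int) (j : Nat),
      (cs.foldl fAltStep ([], 0, none)).2.2 = cs.getLast? ∧
      (cs.foldl fAltStep ([], 0, none)).1.length = cs.length ∧
      1 ≤ (cs.foldl fAltStep ([], 0, none)).2.1 ∧
      ((PySem.List.pyRange 0 (cs.length : Int)).foldl (fStep cs) ([], [])).2.length
        = (cs.foldl fAltStep ([], 0, none)).2.1.toNat ∧
      ((PySem.List.pyRange 0 (cs.length : Int)).foldl (fStep cs) ([], [])).2
        = cs.drop (cs.length - (cs.foldl fAltStep ([], 0, none)).2.1.toNat) ∧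
      PySem.List.max? (cs.foldl fAltStep ([], 0, none)).1 (fun x => x) = some m ∧
      PySem.List.index? (cs.foldl fAltStep ([], 0, none)).1 m = some j ∧
      1 ≤ m ∧ j < cs.length ∧ m.toNat ≤ j + 1 ∧
      ((PySem.List.pyRange 0 (cs.length : Int)).foldl (fStep cs) ([], [])).1.length = m.toNat ∧
      ((PySem.List.pyRange 0 (cs.length : Int)).foldl (fStep cs) ([], [])).1
        = (cs.drop (j + 1 - m.toNat)).take m.toNat := by
  induction cs using List.reverseRecOn with
  | nil => exact absurd rfl h
  | append_singleton ds c ih =>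
      rcases List.eq_nil_or_concat' ds with hds | ⟨_, _, _⟩
      · subst hds
        refine ⟨1, 0, ?_⟩
        have hr : PySem.List.pyRange 0 ((([] ++ [c]).length : Nat) : Int) = [0] := by
          have h1 : ((([] ++ [c]).length : Nat) : Int) = 0 + 1 := by simp
          rw [h1, PySem.List.pyRange_one_singleton]
        rw [hr]
        simp [fStep, fAltStep, PySem.List.max?, PySem.List.index?, List.idxOf?]
      · have hdsne : ds ≠ [] := by simp_all
        obtain ⟨m, j, hprev, hlen, hk1, hblen, hb, hmax, hidx, hm1, hj, hmj, halen, ha⟩ := ih hdsne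
        set stA := (PySem.List.pyRange 0 (ds.length : Int)).foldl (fStep ds) ([], []) with hstA
        set stB := ds.foldl fAltStep ([], 0, none) with hstB
        have hrange : PySem.List.pyRange 0 (((ds ++ [c]).length : Nat) : Int)
            = PySem.List.pyRange 0 (ds.length : Int) ++ [(ds.length : Int)] := by
          have : (((ds ++ [c]).length : Nat) : Int) = (ds.length : Int) + 1 := by simp
          rw [this, PySem.List.pyRange_one_succ_right (by positivity)]
        rw [List.foldl_append, List.foldl_cons, List.foldl_nil, hrange, List.foldl_append,
            fold_congr, List.foldl_cons, List.foldl_nil, ← hstA, ← hstB]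
        set p := ds.getLast hdsne with hp
        have hlast : ds.getLast? = some p := List.getLast?_eq_some_getLast hdsne
        have hn1 : (1 : Int) ≤ (ds.length : Int) := by
          have := List.length_pos_iff.mpr hdsne; omega
        have hcn : PySem.List.pyGetD (ds ++ [c]) (ds.length : Int) ' ' = c := by
          rw [PySem.List.pyGetD_eq_getElem (ds ++ [c]) ' ' (by positivity) (by simp)]
          simp
        have hcp : PySem.List.pyGetD (ds ++ [c]) ((ds.length : Int) - 1) ' ' = p := by
          rw [PySem.List.pyGetD_eq_getElem (ds ++ [c]) ' ' (by omega) (by simp)]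
          have h2 : ((ds.length : Int) - 1).toNat = ds.length - 1 := by omega
          simp only [h2]
          rw [List.getElem_append_left (by omega), hp, List.getLast_eq_getElem]
        have hgt : ((ds.length : Int) > 0) := by omega
        have hklen : stB.2.1.toNat ≤ ds.length := by
          have := congrArg List.length hb
          simp only [hblen, List.length_drop] at this
          omega
        have hdj : j + 1 - m.toNat ≤ ds.length := by omega
        have hdroplen : m.toNat ≤ (ds.drop (j + 1 - m.toNat)).length := by
          have := congrArg List.length ha
          simp only [halen, List.length_take, List.length_drop] at this
          simp only [List.length_drop]
          omega
        by_cases hc : c.toNat = p.toNat + 1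
        · -- ascending step: the current run extends to length k+1
          have hstepA : fStep (ds ++ [c]) stA (ds.length : Int)
              = (if (stA.2 ++ [c]).length > stA.1.length then stA.2 ++ [c] else stA.1,
                 stA.2 ++ [c]) := by
            unfold fStep
            rw [hcn, hcp, if_pos ⟨hgt, hc⟩]
          have hstepB : fAltStep stB c = (stB.1 ++ [stB.2.1 + 1], stB.2.1 + 1, some c) := by
            simp [fAltStep, hprev, hlast, hc]
          rw [hstepA, hstepB]
          dsimp only
          have hblen' : (stA.2 ++ [c]).length = (stB.2.1 + 1).toNat := by
            simp [hblen]; omega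
          have hsuffix : stA.2 ++ [c]
              = (ds ++ [c]).drop ((ds ++ [c]).length - (stB.2.1 + 1).toNat) := by
            have heq : (ds ++ [c]).length - (stB.2.1 + 1).toNat
                = ds.length - stB.2.1.toNat := by simp; omega
            rw [heq, List.drop_append_of_le_length (by omega), hb]
          by_cases hcmp : m < stB.2.1 + 1
          · -- the extended run becomes the unique strict maximum
            have hnotin : (stB.2.1 + 1) ∉ stB.1 := by
              intro hmem
              have := PySem.List.max?_isMax hmax _ hmem
              omega
            have hlong : (stA.2 ++ [c]).length > stA.1.length := by
              rw [hblen', halen]; omega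
            refine ⟨stB.2.1 + 1, stB.1.length, ?_, ?_, ?_, ?_, ?_, ?_, ?_, ?_, ?_, ?_, ?_, ?_⟩
            · simp
            · simp [hlen]
            · omega
            · exact hblen'
            · exact hsuffix
            · rw [max?_append_singleton _ _ _ hmax, if_pos hcmp]
            · exact PySem.List.index?_append_singleton_self _ _ hnotin
            · omega
            · simp [hlen]
            · rw [hlen]; omega
            · rw [if_pos hlong]; exact hblen'
            · rw [if_pos hlong, hlen]
              have heq2 : ds.length + 1 - (stB.2.1 + 1).toNat
                  = (ds ++ [c]).length - (stB.2.1 + 1).toNat := by simp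
              rw [heq2, ← hsuffix, List.take_of_length_le (by rw [hblen'])]
          · -- the old maximum still wins; the first argmax is unchanged
            have hshort : ¬ ((stA.2 ++ [c]).length > stA.1.length) := by
              rw [hblen', halen]; omega
            refine ⟨m, j, ?_, ?_, ?_, ?_, ?_, ?_, ?_, ?_, ?_, ?_, ?_, ?_⟩
            · simp
            · simp [hlen]
            · omega
            · exact hblen'
            · exact hsuffix
            · rw [max?_append_singleton _ _ _ hmax, if_neg hcmp]
            · rw [PySem.List.index?_append_of_mem _ (PySem.List.max?_mem hmax)]; exact hidx
            · exact hm1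
            · simp; omega
            · omega
            · rw [if_neg hshort]; exact halen
            · rw [if_neg hshort, List.drop_append_of_le_length hdj,
                  List.take_append_of_le_length hdroplen]
              exact ha
        · -- non-ascending step: a fresh run of length 1; the old best stays
          have hstepA : fStep (ds ++ [c]) stA (ds.length : Int)
              = (if [c].length > stA.1.length then [c] else stA.1, [c]) := by
            unfold fStep
            rw [hcn, hcp, if_neg (by tauto)]
          have hstepB : fAltStep stB c = (stB.1 ++ [1], 1, some c) := by
            simp [fAltStep, hprev, hlast, hc]
          rw [hstepA, hstepB]
          dsimp only
          have hshort : ¬ ([c].length > stA.1.length) := by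
            rw [halen]; simp; omega
          have hm1' : ¬ (m < (1 : Int)) := by omega
          refine ⟨m, j, ?_, ?_, ?_, ?_, ?_, ?_, ?_, ?_, ?_, ?_, ?_, ?_⟩
          · simp
          · simp [hlen]
          · omega
          · simp
          · have heq : (ds ++ [c]).length - ((1 : Int)).toNat = ds.length := by simp
            rw [heq, List.drop_append_of_le_length le_rfl, List.drop_length, List.nil_append]
          · rw [max?_append_singleton _ _ _ hmax, if_neg hm1']
          · rw [PySem.List.index?_append_of_mem _ (PySem.List.max?_mem hmax)]; exact hidx
          · exact hm1
          · simp; omega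
          · omega
          · rw [if_neg hshort]; exact halen
          · rw [if_neg hshort, List.drop_append_of_le_length hdj,
                List.take_append_of_le_length hdroplen]
            exact ha

theorem f_eq_f_alt (s : String) : f s = f_alt s := by
  unfold f f_alt
  dsimp only
  by_cases h : s.toList = []
  · rw [if_pos h, h]
    rfl
  · rw [if_neg h]
    obtain ⟨m, j, _, _, _, _, _, hmax, hidx, hm1, hj, hmj, _, ha⟩ := inv s.toList h
    rw [hmax]
    dsimp only
    rw [hidx]
    dsimp only
    have e1 : ((j : Int) - m + 1).toNat = j + 1 - m.toNat := by omega
    have e2 : ((j : Int) + 1).toNat - (j + 1 - m.toNat) = m.toNat := by omega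
    rw [ha, PySem.List.slice_toNat s.toList (by omega) (by omega), e1, e2]

-- ===== VERDICT (by name: the statement is the Claim_ definition above) =====
theorem f_spec : Claim_equal_f := by
  intro s _
  unfold Spec_f
  exact f_eq_f_alt s
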